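-- pv_equiv track=rewrite | github.com/Leapense/problems | 3496번: Binary Encoding/Binary Encoding.py | truncated_binary_encoding
-- ===== SOURCE A (Python) =====
-- import math
--
-- def truncated_binary_encoding(m):
--     n = math.ceil(math.log2(m))
--     total_bits = 2 ** n
--     k = total_bits - m
--
--     codes = []
--
--     for i in range(k):
--         code = format(i, f'0{n-1}b')
--         codes.append(code)
--
--     start = total_bits - (m - k)
--     for i in range(start, total_bits):
--         code = format(i, f'0{n}b')
--         codes.append(code)
--
--     return codes
-- ===== SOURCE B (Python) =====
-- import math
--
-- def _succ(s):
--     # binary-string successor of fixed width (wraps to all zeros on overflow)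
--     bits = list(s)
--     i = len(bits) - 1
--     while i >= 0 and bits[i] == '1':
--         bits[i] = '0'
--         i -= 1
--     if i >= 0:
--         bits[i] = '1'
--     return ''.join(bits)
--
-- def truncated_binary_encoding(m):
--     # Incremental construction: keep the current code word as a bit string and
--     # advance it with a binary-string successor; after the last short code the
--     # string is shifted (a '0' is appended), which is exactly the first long
--     # code.  No per-symbol arithmetic/formatting is done.
--     n = math.ceil(math.log2(m))
--     u = 2 ** n - m          # number of short (n-1)-bit codes
--     codes = []
--     if u > 0:
--         s = '0' * (n - 1)
--         for _ in range(u):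
--             codes.append(s)
--             s = _succ(s)
--         s += '0'
--     else:
--         s = '0' * n if n else '0'   # binary of 0 always has one digit
--     for _ in range(m - u):
--         codes.append(s)
--         s = _succ(s)
--     return codes
-- ===== Notes on version B (the rewrite author's own statement) =====
-- stated objective: alternative
-- what changed: Instead of formatting each index arithmetically over two precomputed ranges, B keeps the current code word as a bit string and builds all codes incrementally with a binary-string successor, appending a '0' at the short-to-long transition.
-- outside the precondition, e.g. on truncated_binary_encoding(0): A raises ValueError, B raises ValueError
import Mathlib
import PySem

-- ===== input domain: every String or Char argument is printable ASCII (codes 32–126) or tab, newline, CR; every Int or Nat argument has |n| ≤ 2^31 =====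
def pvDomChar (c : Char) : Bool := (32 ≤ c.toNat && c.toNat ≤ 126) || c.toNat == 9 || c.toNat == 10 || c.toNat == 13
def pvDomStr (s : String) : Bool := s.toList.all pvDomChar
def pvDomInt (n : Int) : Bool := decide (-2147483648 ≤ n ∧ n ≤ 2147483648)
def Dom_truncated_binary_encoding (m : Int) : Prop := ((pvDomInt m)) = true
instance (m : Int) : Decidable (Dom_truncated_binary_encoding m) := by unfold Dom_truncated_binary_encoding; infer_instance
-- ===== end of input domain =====

-- B builds the codes incrementally with a binary-string successor instead of
-- formatting each index arithmetically over two ranges (alternative algorithm).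

-- ===== PORT A =====
-- binary digits of v > 0, most significant first (the digit production inside format(i,'b'))
def pvBinGo (v : Nat) : List Char :=
  if h : v = 0 then []
  else pvBinGo (v / 2) ++ [if v % 2 = 1 then '1' else '0']
decreasing_by exact Nat.div_lt_self (Nat.pos_of_ne_zero h) (by norm_num)

-- format(i, f'0{w}b') for i ≥ 0: binary digits of i (at least one digit),
-- left-padded with '0' to width w; exact for i ≥ 0 (both programs only call it so).
def pvFormatBin (width i : Int) : String :=
  let s := if i = 0 then ['0'] else pvBinGo i.toNat
  String.ofList (List.replicate (width.toNat - s.length) '0' ++ s)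

def truncated_binary_encoding (m : Int) : List String :=
  -- n = math.ceil(math.log2(m)): exact as Nat.clog 2 m on the domain (1 ≤ m ≤ 2^31,
  -- where the float computation is exact)
  let n : Int := Nat.clog 2 m.toNat
  let total_bits : Int := 2 ^ n.toNat
  let k := total_bits - m
  let codes := (PySem.List.pyRange 0 k 1).map (fun i => pvFormatBin (n - 1) i)
  let start := total_bits - (m - k)
  codes ++ (PySem.List.pyRange start total_bits 1).map (fun i => pvFormatBin n i)

-- ===== PORT B =====
-- _succ: the backward while loop flips trailing '1's then sets the first '0';
-- on the reversed character list that is this structural recursion.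
def pvSuccRev : List Char → List Char
  | [] => []
  | c :: rest => if c = '1' then '0' :: pvSuccRev rest else '1' :: rest

def pvSucc (s : List Char) : List Char := (pvSuccRev s.reverse).reverse

-- 'for _ in range(k): codes.append(s); s = _succ(s)' — returns (codes, final s)
def pvEmit : Nat → List Char → List String × List Char
  | 0, s => ([], s)
  | (k+1), s =>
      let r := pvEmit k (pvSucc s)
      (String.ofList s :: r.1, r.2)

def truncated_binary_encoding_alt (m : Int) : List String :=
  let n : Int := Nat.clog 2 m.toNat
  let u : Int := 2 ^ n.toNat - m
  let p : List String × List Char :=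
    if 0 < u then
      let r := pvEmit u.toNat (List.replicate (n - 1).toNat '0')
      (r.1, r.2 ++ ['0'])
    else
      ([], if n = 0 then ['0'] else List.replicate n.toNat '0')
  let r2 := pvEmit (m - u).toNat p.2
  p.1 ++ r2.1

-- ===== PRECONDITION & SPEC =====
-- Pre_ excludes m ≤ 0, on which A raises ValueError (math.log2 domain error).
def Pre_truncated_binary_encoding (m : Int) : Prop := 1 ≤ m
instance (m : Int) : Decidable (Pre_truncated_binary_encoding m) := by
  unfold Pre_truncated_binary_encoding; infer_instance
def pvWitness_truncated_binary_encoding : Int := (5)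

def Spec_truncated_binary_encoding (m : Int) (out : List String) : Prop := out = truncated_binary_encoding_alt m
instance (m : Int) (out : List String) : Decidable (Spec_truncated_binary_encoding m out) := by unfold Spec_truncated_binary_encoding; infer_instance

-- ===== CLAIM (what is proved, stated in full; the proofs are below) =====
def Claim_equal_truncated_binary_encoding : Prop := ∀ (m : Int), Dom_truncated_binary_encoding m → Pre_truncated_binary_encoding m → Spec_truncated_binary_encoding m (truncated_binary_encoding m)

-- ===== LEMMAS AND PROOFS =====

-- fixed-width binary representation, most significant digit first
def recB : Nat → Nat → List Char
  | 0, _ => []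
  | (w+1), v => recB w (v / 2) ++ [if v % 2 = 1 then '1' else '0']

theorem recB_zero (w : Nat) : recB w 0 = List.replicate w '0' := by
  induction w with
  | zero => rfl
  | succ w ih => simp [recB, ih, List.replicate_succ' (n := w)]

theorem recB_length (w v : Nat) : (recB w v).length = w := by
  induction w generalizing v with
  | zero => rfl
  | succ w ih => simp [recB, ih]

theorem recB_cons (w v : Nat) (h : v < 2 ^ w) : recB (w + 1) v = '0' :: recB w v := by
  induction w generalizing v with
  | zero =>
    interval_cases v
    rfl
  | succ w ih =>
    have hv : v / 2 < 2 ^ w := by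
      have : 2 ^ (w + 1) = 2 * 2 ^ w := by ring
      omega
    calc recB (w + 2) v = recB (w + 1) (v / 2) ++ [if v % 2 = 1 then '1' else '0'] := rfl
      _ = ('0' :: recB w (v / 2)) ++ [if v % 2 = 1 then '1' else '0'] := by rw [ih _ hv]
      _ = '0' :: recB (w + 1) v := rfl

theorem recB_pad (L w v : Nat) (hL : L ≤ w) (hv : v < 2 ^ L) :
    recB w v = List.replicate (w - L) '0' ++ recB L v := by
  induction w with
  | zero => interval_cases L; simp
  | succ w ih =>
    rcases Nat.lt_or_ge L (w + 1) with hlt | hge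
    · have hLw : L ≤ w := by omega
      have hv2 : v < 2 ^ w := lt_of_lt_of_le hv (Nat.pow_le_pow_right (by norm_num) hLw)
      rw [recB_cons w v hv2, ih hLw]
      have : w + 1 - L = (w - L) + 1 := by omega
      rw [this, List.replicate_succ]
      rfl
    · have : L = w + 1 := by omega
      subst this
      simp

theorem pvBinGo_eq (v : Nat) (h : 1 ≤ v) : pvBinGo v = recB (Nat.log2 v + 1) v := by
  induction v using Nat.strong_induction_on with
  | _ v ih =>
    rcases Nat.lt_or_ge v 2 with h2 | h2
    · interval_cases v
      rw [pvBinGo, pvBinGo]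
      simp [show Nat.log2 1 = 0 from rfl, recB]
    · have hlog : Nat.log2 v = Nat.log2 (v / 2) + 1 := by
        rw [Nat.log2_def]; simp [h2]
      rw [pvBinGo]
      rw [dif_neg (show ¬ v = 0 by omega)]
      rw [ih (v / 2) (by omega) (by omega), hlog]
      rfl

theorem pvFormatBin_eq (w v : Nat) (hw : 1 ≤ w) (hv : v < 2 ^ w) :
    pvFormatBin (w : Int) (v : Int) = String.ofList (recB w v) := by
  unfold pvFormatBin
  rcases Nat.eq_zero_or_pos v with h0 | hpos
  · subst h0
    simp only [Int.natCast_eq_zero, ite_true, Int.toNat_natCast]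
    rw [recB_pad 1 w 0 hw (by norm_num)]
    simp [show recB 1 0 = ['0'] from rfl]
  · have hne : (v : Int) ≠ 0 := by exact_mod_cast Nat.pos_iff_ne_zero.mp hpos
    simp only [hne, ite_false, Int.toNat_natCast]
    rw [pvBinGo_eq v hpos, recB_length]
    rw [recB_pad (Nat.log2 v + 1) w v (by
        have := (Nat.log2_lt (by omega)).mpr hv; omega)
      (Nat.lt_log2_self)]

theorem pvSucc_recB (w v : Nat) (h : v + 1 < 2 ^ w) :
    pvSucc (recB w v) = recB w (v + 1) := by
  suffices hrev : pvSuccRev ((recB w v).reverse) = (recB w (v + 1)).reverse by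
    unfold pvSucc
    rw [hrev, List.reverse_reverse]
  induction w generalizing v with
  | zero => simp at h
  | succ w ih =>
    simp only [recB, List.reverse_append, List.reverse_cons, List.reverse_nil,
      List.nil_append, List.cons_append]
    rcases Nat.even_or_odd v with he | ho
    · have h2 : v % 2 = 0 := Nat.even_iff.mp he
      have h2' : (v + 1) % 2 = 1 := by omega
      have hd : (v + 1) / 2 = v / 2 := by omega
      simp [pvSuccRev, h2, h2', hd]
    · have h2 : v % 2 = 1 := Nat.odd_iff.mp ho
      have h2' : (v + 1) % 2 = 0 := by omega
      have hd : (v + 1) / 2 = v / 2 + 1 := by omega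
      have hlt : v / 2 + 1 < 2 ^ w := by
        have : 2 ^ (w + 1) = 2 * 2 ^ w := by ring
        omega
      simp only [pvSuccRev, h2, ite_true, h2', hd]
      rw [ih _ hlt]
      simp

theorem pvEmit_spec (k : Nat) (w v : Nat) (h : v + k ≤ 2 ^ w) :
    (pvEmit k (recB w v)).1
      = (List.range k).map (fun j => String.ofList (recB w (v + j)))
    ∧ (v + k < 2 ^ w → (pvEmit k (recB w v)).2 = recB w (v + k)) := by
  induction k generalizing v with
  | zero => simp [pvEmit]
  | succ k ih =>
    by_cases hs : v + 1 < 2 ^ w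
    · have hrec : pvEmit (k + 1) (recB w v)
          = (String.ofList (recB w v) :: (pvEmit k (pvSucc (recB w v))).1,
             (pvEmit k (pvSucc (recB w v))).2) := rfl
      rw [hrec, pvSucc_recB w v hs]
      obtain ⟨ih1, ih2⟩ := ih (v + 1) (by omega)
      constructor
      · rw [ih1, List.range_succ_eq_map, List.map_cons, List.map_map]
        simp only [Nat.add_zero]
        congr 1
        apply List.map_congr_left
        intro j _
        simp only [Function.comp_apply]
        congr 2
        omega
      · intro hlt
        rw [ih2 (by omega)]
        congr 1
        omega
    · have hk : k = 0 := by omega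
      subst hk
      constructor
      · simp [pvEmit]
      · intro hlt; omega

theorem pv_le_pow_clog (m : Int) (h : 1 ≤ m) :
    m ≤ (2 : Int) ^ (Nat.clog 2 m.toNat) := by
  have := Nat.le_pow_clog (by norm_num : 1 < 2) m.toNat
  have h2 : ((m.toNat : Int)) ≤ ((2 ^ Nat.clog 2 m.toNat : Nat) : Int) := by exact_mod_cast this
  rw [Int.toNat_of_nonneg (by omega)] at h2
  simpa using h2

theorem pv_pow_pred_clog_lt (m : Int) (h : 2 ≤ m) :
    (2 : Int) ^ (Nat.clog 2 m.toNat - 1) < m := by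
  have h1 : 1 < m.toNat := by omega
  have := Nat.pow_pred_clog_lt_self (by norm_num : 1 < 2) h1
  rw [Nat.pred_eq_sub_one] at this
  have h3 : ((2 ^ (Nat.clog 2 m.toNat - 1) : Nat) : Int) < ((m.toNat : Nat) : Int) := by
    exact_mod_cast this
  rw [Int.toNat_of_nonneg (by omega)] at h3
  simpa using h3

-- the main equality for m ≥ 2
theorem truncated_binary_encoding_eq (m : Int) (h : 2 ≤ m) :
    truncated_binary_encoding m = truncated_binary_encoding_alt m := by
  unfold truncated_binary_encoding truncated_binary_encoding_alt
  simp only [Int.toNat_natCast]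
  set N := Nat.clog 2 m.toNat with hN
  have hN1 : 1 ≤ N := by
    have := Nat.clog_pos (by norm_num : 1 < 2) (show 1 < m.toNat by omega)
    omega
  have hub : m ≤ (2:Int) ^ N := pv_le_pow_clog m (by omega)
  have hlb : (2:Int) ^ (N - 1) < m := pv_pow_pred_clog_lt m h
  have hpowN : (2:Int) ^ N = ((2 ^ N : Nat) : Int) := by push_cast; ring
  have hpow2 : (2:Nat) ^ N = 2 * 2 ^ (N - 1) := by
    conv_lhs => rw [show N = (N - 1) + 1 by omega]
    rw [pow_succ']
  set u : Int := 2 ^ N - m with hu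
  have hu0 : 0 ≤ u := by omega
  have hMu : (m - u).toNat = m.toNat - u.toNat := by omega
  -- A's two ranges, as List.range over Nat values
  rw [PySem.List.pyRange_one 0 u, PySem.List.pyRange_one ((2:Int)^N - (m - u)) ((2:Int)^N)]
  simp only [Int.sub_zero, Int.zero_add]
  by_cases hupos : 0 < u
  · -- u > 0: m is not a power of two; N ≥ 2 and u < 2^(N-1)
    have hulb : u.toNat < 2 ^ (N - 1) := by
      have h1 : (2:Int) ^ (N-1) = ((2 ^ (N-1) : Nat) : Int) := by push_cast; ring
      have : u < (2:Int) ^ (N - 1) := by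
        have : (2:Int) ^ N = 2 * 2 ^ (N - 1) := by
          rw [hpowN, hpow2]; push_cast; ring
        omega
      omega
    have hN2 : 2 ≤ N := by
      by_contra hc
      have : N = 1 := by omega
      rw [this] at hulb
      simp at hulb
      omega
    rw [if_pos hupos]
    obtain ⟨he1, he2⟩ := pvEmit_spec u.toNat (N - 1) 0
      (by simpa using Nat.le_of_lt hulb)
    rw [show List.replicate ((↑N - 1 : Int)).toNat '0' = recB (N - 1) 0 by
      rw [recB_zero]; congr 1; omega]
    rw [he1, he2 (by simpa using hulb)]
    simp only [Nat.zero_add]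
    congr 1
    · -- short codes
      rw [List.map_map]
      apply List.map_congr_left
      intro j hj
      simp only [List.mem_range] at hj
      simp only [Function.comp_apply]
      have hj2 : j < 2 ^ (N - 1) := by omega
      rw [show ((N : Int) - 1) = (((N - 1 : Nat)) : Int) by omega]
      exact pvFormatBin_eq (N - 1) j (by omega) hj2
    · -- long codes: start string is recB N (2 * u.toNat)
      have hconc : recB (N - 1) u.toNat ++ ['0'] = recB N (2 * u.toNat) := by
        conv_rhs => rw [show N = (N - 1) + 1 by omega]
        show _ = recB (N - 1) (2 * u.toNat / 2) ++ [if 2 * u.toNat % 2 = 1 then '1' else '0']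
        rw [Nat.mul_div_cancel_left _ (by norm_num), Nat.mul_mod_right]
        rfl
      rw [hconc]
      obtain ⟨he3, _⟩ := pvEmit_spec (m - u).toNat N (2 * u.toNat) (by
        have hm : m.toNat + u.toNat = 2 ^ N := by omega
        omega)
      rw [he3, List.map_map]
      have hlen : ((2:Int) ^ N - ((2:Int) ^ N - (m - u))).toNat = (m - u).toNat := by
        omega
      rw [hlen]
      apply List.map_congr_left
      intro j hj
      simp only [List.mem_range, hMu] at hj
      simp only [Function.comp_apply]
      have hval : (2:Int) ^ N - (m - u) + (j : Int) = ((2 * u.toNat + j : Nat) : Int) := by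
        omega
      rw [hval]
      have hvlt : 2 * u.toNat + j < 2 ^ N := by omega
      exact pvFormatBin_eq N (2 * u.toNat + j) (by omega) hvlt
  · -- u = 0: m = 2^N, all codes have width N
    have hu0' : u = 0 := by omega
    rw [if_neg hupos]
    have hNne : ¬ ((N : Int) = 0) := by
      simpa using (by omega : ¬ N = 0)
    rw [if_neg hNne]
    rw [show List.replicate N '0' = recB N 0 from (recB_zero N).symm]
    obtain ⟨he1, _⟩ := pvEmit_spec (m - u).toNat N 0 (by omega)
    rw [he1]
    simp only [Nat.zero_add, List.nil_append]
    rw [show u.toNat = 0 by omega]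
    simp only [List.range_zero, List.map_nil, List.nil_append]
    rw [List.map_map]
    have hlen : ((2:Int) ^ N - ((2:Int) ^ N - (m - u))).toNat = (m - u).toNat := by omega
    rw [hlen]
    apply List.map_congr_left
    intro j hj
    simp only [List.mem_range] at hj
    simp only [Function.comp_apply]
    have hval : (2:Int) ^ N - (m - u) + (j : Int) = ((j : Nat) : Int) := by
      push_cast; omega
    rw [hval]
    have hjlt : j < 2 ^ N := by omega
    exact pvFormatBin_eq N j (by omega) hjlt

-- ===== VERDICT (by name: the statement is the Claim_ definition above) =====
theorem truncated_binary_encoding_spec : Claim_equal_truncated_binary_encoding := by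
  intro m _ hpre
  unfold Spec_truncated_binary_encoding
  rcases eq_or_lt_of_le hpre with h1 | h2
  · rw [← h1]
    decide
  · exact truncated_binary_encoding_eq m (by omega)
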